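-- pv_equiv track=rewrite | github.com/souravskr/data-structures-algorithms | Udemy-Course/Graphs/leetcode.py | valid_path_for_undirected_graph
-- ===== SOURCE A (Python) =====
-- from collections import defaultdict
--
-- def valid_path_for_undirected_graph(edges, source, destination):
--     adj_list = defaultdict(list)
--     for v1, v2 in edges:
--         adj_list[v1].append(v2)
--         adj_list[v2].append(v1)
--
--     def dfs(src, dst, visited):
--         if src == dst:
--             return True
--         if src in visited:
--             return False
--
--         visited.add(src)
--
--         for vertex in adj_list[src]:
--             if dfs(vertex, dst, visited):
--                 return True
--         return False
--
--     visited = set()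
--     return dfs(source, destination, visited)
-- ===== SOURCE B (Python) =====
-- def valid_path_for_undirected_graph(edges, source, destination):
--     # Grow the connected component of `source` by relaxing edges until the
--     # set stops changing (it has at most 2*len(edges)+1 vertices), then test
--     # whether `destination` landed in it.
--     comp = {source}
--     while True:
--         grown = set(comp)
--         for u, v in edges:
--             if u in comp:
--                 grown.add(v)
--             if v in comp:
--                 grown.add(u)
--         if len(grown) == len(comp):
--             return destination in comp
--         comp = grown
-- ===== Notes on version B (the rewrite author's own statement) =====
-- stated objective: alternative
-- what changed: Replaces A's recursive DFS with a shared visited set by an iterative fixpoint computation: repeatedly relax every edge to grow the connected component of source until the set stops changing, then test membership of destination.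
import Mathlib
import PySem

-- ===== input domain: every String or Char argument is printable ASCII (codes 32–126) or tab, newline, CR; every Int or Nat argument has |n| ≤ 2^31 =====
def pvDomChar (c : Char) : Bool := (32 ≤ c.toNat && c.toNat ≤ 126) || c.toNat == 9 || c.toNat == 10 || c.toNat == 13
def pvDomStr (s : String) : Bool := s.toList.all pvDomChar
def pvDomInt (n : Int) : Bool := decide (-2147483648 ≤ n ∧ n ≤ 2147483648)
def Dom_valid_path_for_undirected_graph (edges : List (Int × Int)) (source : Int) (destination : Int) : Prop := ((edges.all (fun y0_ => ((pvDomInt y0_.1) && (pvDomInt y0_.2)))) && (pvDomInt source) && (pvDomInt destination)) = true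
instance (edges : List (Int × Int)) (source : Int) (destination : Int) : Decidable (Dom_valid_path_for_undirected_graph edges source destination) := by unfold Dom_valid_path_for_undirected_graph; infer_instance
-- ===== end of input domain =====

-- B replaces A's recursive shared-visited DFS by an iterative fixpoint computation of the
-- connected component of `source` (relax every edge until the set stops growing); alternative
-- decomposition, same return value.

-- ===== PORT A =====
-- adjacency: for v1, v2 in edges: adj_list[v1].append(v2); adj_list[v2].append(v1)
def pvAdj (edges : List (Int × Int)) : PySem.Dict Int (List Int) :=
  edges.foldl (fun d e => (d.modify e.1 [] (· ++ [e.2])).modify e.2 [] (· ++ [e.1]))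
    PySem.Dict.empty

-- dfs(src, dst, visited): the fuel argument only makes the recursion structural; with the
-- fuel used below it is never exhausted (each call either returns or enlarges visited,
-- which stays inside the ≤ 2*len(edges)+1 vertices that occur).
mutual
def pvDfs (adj : PySem.Dict Int (List Int)) (dst : Int) :
    Nat → Int → PySem.Set Int → Bool × PySem.Set Int
  | 0, _, vis => (false, vis)
  | f+1, src, vis =>
    if src = dst then (true, vis)
    else if src ∈ vis then (false, vis)
    else pvDfsList adj dst f (adj.getD src []) (PySem.Set.add vis src)
  termination_by f _ _ => (f, 0)

-- the `for vertex in adj_list[src]` loop with its early `return True`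
def pvDfsList (adj : PySem.Dict Int (List Int)) (dst : Int) :
    Nat → List Int → PySem.Set Int → Bool × PySem.Set Int
  | _, [], vis => (false, vis)
  | f, w :: ws, vis =>
    let r := pvDfs adj dst f w vis
    if r.1 then (true, r.2) else pvDfsList adj dst f ws r.2
  termination_by f l _ => (f, l.length + 1)
end

def valid_path_for_undirected_graph (edges : List (Int × Int)) (source : Int) (destination : Int) : Bool :=
  (pvDfs (pvAdj edges) destination (2 * edges.length + 2) source PySem.Set.empty).1

-- ===== PORT B =====
-- grown = set(comp); for u, v in edges: if u in comp: grown.add(v); if v in comp: grown.add(u)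
def pvGrowStep (comp grown : PySem.Set Int) (e : Int × Int) : PySem.Set Int :=
  let g1 := if e.1 ∈ comp then PySem.Set.add grown e.2 else grown
  if e.2 ∈ comp then PySem.Set.add g1 e.1 else g1

def pvGrow (edges : List (Int × Int)) (comp : PySem.Set Int) : PySem.Set Int :=
  edges.foldl (pvGrowStep comp) (PySem.Set.ofList comp)

-- the `while True` loop; fuel only makes it structural (the set grows strictly every
-- iteration until stable and has at most 2*len(edges)+1 members, so fuel never runs out)
def pvLoopB (edges : List (Int × Int)) (destination : Int) :
    Nat → PySem.Set Int → Bool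
  | 0, comp => decide (destination ∈ comp)
  | n+1, comp =>
    let grown := pvGrow edges comp
    if grown.length = comp.length then decide (destination ∈ comp)
    else pvLoopB edges destination n grown

def valid_path_for_undirected_graph_alt (edges : List (Int × Int)) (source : Int) (destination : Int) : Bool :=
  pvLoopB edges destination (2 * edges.length + 2) (PySem.Set.add PySem.Set.empty source)

-- ===== PRECONDITION & SPEC =====
def Spec_valid_path_for_undirected_graph (edges : List (Int × Int)) (source : Int) (destination : Int) (out : Bool) : Prop := out = valid_path_for_undirected_graph_alt edges source destination
instance (edges : List (Int × Int)) (source : Int) (destination : Int) (out : Bool) : Decidable (Spec_valid_path_for_undirected_graph edges source destination out) := by unfold Spec_valid_path_for_undirected_graph; infer_instance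

-- ===== CLAIM (what is proved, stated in full; the proofs are below) =====
def Claim_equal_valid_path_for_undirected_graph : Prop := ∀ (edges : List (Int × Int)) (source : Int) (destination : Int), Dom_valid_path_for_undirected_graph edges source destination → Spec_valid_path_for_undirected_graph edges source destination (valid_path_for_undirected_graph edges source destination)

-- ===== LEMMAS AND PROOFS =====

-- the undirected edge relation and reachability
def pvE (edges : List (Int × Int)) (u v : Int) : Prop := (u, v) ∈ edges ∨ (v, u) ∈ edges

def pvReach (edges : List (Int × Int)) (s d : Int) : Prop := Relation.ReflTransGen (pvE edges) s d

-- universe of vertices that can ever be visited / added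
def pvU (edges : List (Int × Int)) (source : Int) : List Int :=
  source :: edges.flatMap (fun e => [e.1, e.2])

theorem pvU_length (edges : List (Int × Int)) (source : Int) :
    (pvU edges source).length = 2 * edges.length + 1 := by
  induction edges with
  | nil => rfl
  | cons e es ih =>
    have h : (es.flatMap (fun e => [e.1, e.2])).length = 2 * es.length := by
      simp only [pvU, List.length_cons] at ih; omega
    simp only [pvU, List.flatMap_cons, List.length_cons, List.length_append, List.length_nil, h]
    omega

theorem pvE_mem_U {edges : List (Int × Int)} {u v : Int} (h : pvE edges u v) (source : Int) :
    v ∈ pvU edges source := by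
  rcases h with h | h
  · exact List.mem_cons_of_mem _ (List.mem_flatMap.2 ⟨(u, v), h, by simp⟩)
  · exact List.mem_cons_of_mem _ (List.mem_flatMap.2 ⟨(v, u), h, by simp⟩)

theorem pv_nodup_length_le {l₁ l₂ : List Int} (h : l₁.Nodup) (hs : ∀ x ∈ l₁, x ∈ l₂) :
    l₁.length ≤ l₂.length :=
  (List.subperm_of_subset h hs).length_le

-- the adjacency dict realizes pvE
theorem pvAdj_step_mem (d : PySem.Dict Int (List Int)) (e : Int × Int) (u v : Int) :
    v ∈ ((d.modify e.1 [] (· ++ [e.2])).modify e.2 [] (· ++ [e.1])).getD u []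
      ↔ v ∈ d.getD u [] ∨ (u, v) = e ∨ (v, u) = e := by
  simp only [PySem.Dict.getD_modify, Prod.ext_iff]
  split_ifs with h1 h2 h3 <;>
    simp_all [List.mem_append]

theorem pvAdj_fold_mem (l : List (Int × Int)) (d : PySem.Dict Int (List Int)) (u v : Int) :
    v ∈ (l.foldl (fun d e => (d.modify e.1 [] (· ++ [e.2])).modify e.2 [] (· ++ [e.1])) d).getD u []
      ↔ v ∈ d.getD u [] ∨ (u, v) ∈ l ∨ (v, u) ∈ l := by
  induction l generalizing d with
  | nil => simp
  | cons e es ih =>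
    rw [List.foldl_cons, ih, pvAdj_step_mem]
    simp only [List.mem_cons]
    tauto

theorem pvAdj_getD_mem (edges : List (Int × Int)) (u v : Int) :
    v ∈ (pvAdj edges).getD u [] ↔ pvE edges u v := by
  rw [pvAdj, pvAdj_fold_mem, pvE]
  simp [PySem.Dict.getD_empty]

-- the invariant carried by the visited set through the DFS
def pvInv (edges : List (Int × Int)) (source dst : Int) (V : PySem.Set Int) : Prop :=
  V.Nodup ∧ (∀ x ∈ V, x ∈ pvU edges source) ∧ dst ∉ V

-- what a FALSE answer of dfs guarantees
def pvPdfs (edges : List (Int × Int)) (source dst : Int) (f : Nat) : Prop :=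
  ∀ (V : PySem.Set Int) (u : Int), pvInv edges source dst V → u ∈ pvU edges source →
    2 * edges.length + 2 ≤ f + V.length →
    (pvDfs (pvAdj edges) dst f u V).1 = false →
    pvInv edges source dst (pvDfs (pvAdj edges) dst f u V).2 ∧
    (∀ x ∈ V, x ∈ (pvDfs (pvAdj edges) dst f u V).2) ∧
    u ∈ (pvDfs (pvAdj edges) dst f u V).2 ∧
    (∀ x ∈ (pvDfs (pvAdj edges) dst f u V).2, x ∉ V →
      ∀ w ∈ (pvAdj edges).getD x [], w ∈ (pvDfs (pvAdj edges) dst f u V).2)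

def pvPlist (edges : List (Int × Int)) (source dst : Int) (f : Nat) : Prop :=
  ∀ (V : PySem.Set Int) (l : List Int), pvInv edges source dst V →
    (∀ w ∈ l, w ∈ pvU edges source) →
    2 * edges.length + 2 ≤ f + V.length →
    (pvDfsList (pvAdj edges) dst f l V).1 = false →
    pvInv edges source dst (pvDfsList (pvAdj edges) dst f l V).2 ∧
    (∀ x ∈ V, x ∈ (pvDfsList (pvAdj edges) dst f l V).2) ∧
    (∀ w ∈ l, w ∈ (pvDfsList (pvAdj edges) dst f l V).2) ∧
    (∀ x ∈ (pvDfsList (pvAdj edges) dst f l V).2, x ∉ V →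
      ∀ w ∈ (pvAdj edges).getD x [], w ∈ (pvDfsList (pvAdj edges) dst f l V).2)

theorem pvPlist_of_pvPdfs (edges : List (Int × Int)) (source dst : Int) (f : Nat)
    (hdfs : pvPdfs edges source dst f) : pvPlist edges source dst f := by
  intro V l
  induction l generalizing V with
  | nil =>
    intro hInv _ _ _
    simp only [pvDfsList]
    exact ⟨hInv, fun x hx => hx, by simp, fun x hx hxV => (hxV hx).elim⟩
  | cons w ws ihl =>
    intro hInv hlU hfuel hfalse
    cases hb : (pvDfs (pvAdj edges) dst f w V).1 with
    | true =>
      exfalso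
      simp only [pvDfsList, hb] at hfalse
      simp at hfalse
    | false =>
      obtain ⟨hInv', hVsub, hwin, hclosA⟩ :=
        hdfs V w hInv (hlU w (List.mem_cons_self ..)) hfuel hb
      have heq : pvDfsList (pvAdj edges) dst f (w :: ws) V =
          pvDfsList (pvAdj edges) dst f ws (pvDfs (pvAdj edges) dst f w V).2 := by
        simp only [pvDfsList, hb]
        simp
      rw [heq] at hfalse ⊢
      have hfuel' : 2 * edges.length + 2 ≤ f + (pvDfs (pvAdj edges) dst f w V).2.length := by
        have := pv_nodup_length_le hInv.1 hVsub
        omega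
      obtain ⟨hInv'', hsub', hws', hclos'⟩ :=
        ihl _ hInv' (fun x hx => hlU x (List.mem_cons_of_mem _ hx)) hfuel' hfalse
      refine ⟨hInv'', fun x hx => hsub' x (hVsub x hx), ?_, ?_⟩
      · intro x hx
        rcases List.mem_cons.1 hx with rfl | hx
        · exact hsub' _ hwin
        · exact hws' x hx
      · intro x hx hxV w' hw'
        by_cases hxV' : x ∈ (pvDfs (pvAdj edges) dst f w V).2
        · exact hsub' _ (hclosA x hxV' hxV w' hw')
        · exact hclos' x hx hxV' w' hw'

theorem pvPdfs_all (edges : List (Int × Int)) (source dst : Int) :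
    ∀ f, pvPdfs edges source dst f := by
  intro f
  induction f with
  | zero =>
    intro V u hInv _ hfuel _
    exfalso
    have := pv_nodup_length_le hInv.1 hInv.2.1
    rw [pvU_length] at this
    omega
  | succ f ih =>
    intro V u hInv hU hfuel hfalse
    by_cases h1 : u = dst
    · exfalso
      simp only [pvDfs, if_pos h1] at hfalse
      simp at hfalse
    · by_cases h2 : u ∈ V
      · have heq : pvDfs (pvAdj edges) dst (f+1) u V = (false, V) := by
          simp only [pvDfs, if_neg h1, if_pos h2]
        rw [heq]
        exact ⟨hInv, fun x hx => hx, h2, fun x hx hxV => (hxV hx).elim⟩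
      · have heq : pvDfs (pvAdj edges) dst (f+1) u V =
            pvDfsList (pvAdj edges) dst f ((pvAdj edges).getD u []) (PySem.Set.add V u) := by
          simp only [pvDfs, if_neg h1, if_neg h2]
        rw [heq] at hfalse ⊢
        have haddeq : PySem.Set.add V u = V ++ [u] := by
          rw [PySem.Set.add_eq_ite, if_neg h2]
        have hInv1 : pvInv edges source dst (PySem.Set.add V u) := by
          refine ⟨PySem.Set.nodup_add _ _ hInv.1, ?_, ?_⟩
          · intro x hx
            rcases (PySem.Set.mem_add _ _ _).1 hx with hx | rfl
            · exact hInv.2.1 x hx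
            · exact hU
          · intro hdst
            rcases (PySem.Set.mem_add _ _ _).1 hdst with hdst | hdst
            · exact hInv.2.2 hdst
            · exact h1 hdst.symm
        have hlU : ∀ w ∈ (pvAdj edges).getD u [], w ∈ pvU edges source := fun w hw =>
          pvE_mem_U ((pvAdj_getD_mem edges u w).1 hw) source
        have hlen1 : (PySem.Set.add V u).length = V.length + 1 := by
          rw [haddeq, List.length_append]
          simp
        have hfuel1 : 2 * edges.length + 2 ≤ f + (PySem.Set.add V u).length := by omega
        obtain ⟨hInv', hsub, hall, hclos⟩ :=
          pvPlist_of_pvPdfs edges source dst f ih _ _ hInv1 hlU hfuel1 hfalse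
        refine ⟨hInv', fun x hx => hsub _ ((PySem.Set.mem_add _ _ _).2 (Or.inl hx)),
          hsub _ ((PySem.Set.mem_add _ _ _).2 (Or.inr rfl)), ?_⟩
        intro x hx hxV w hw
        by_cases hxu : x = u
        · subst hxu
          exact hall w hw
        · have hxadd : x ∉ PySem.Set.add V u := by
            intro hmem
            rcases (PySem.Set.mem_add _ _ _).1 hmem with hmem | hmem
            · exact hxV hmem
            · exact hxu hmem
          exact hclos x hx hxadd w hw

theorem pvDfsList_sound_step (edges : List (Int × Int)) (dst : Int) (f : Nat)
    (hdfs : ∀ (u : Int) (V : PySem.Set Int),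
      (pvDfs (pvAdj edges) dst f u V).1 = true → pvReach edges u dst) :
    ∀ (l : List Int) (V : PySem.Set Int),
      (pvDfsList (pvAdj edges) dst f l V).1 = true → ∃ w ∈ l, pvReach edges w dst := by
  intro l
  induction l with
  | nil =>
    intro V h
    simp [pvDfsList] at h
  | cons w ws ihl =>
    intro V h
    cases hb : (pvDfs (pvAdj edges) dst f w V).1 with
    | true => exact ⟨w, List.mem_cons_self .., hdfs w V hb⟩
    | false =>
      simp only [pvDfsList, hb] at h
      simp at h
      rcases ihl _ h with ⟨w', hw', hr⟩
      exact ⟨w', List.mem_cons_of_mem _ hw', hr⟩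

-- soundness: a TRUE answer exhibits a path
theorem pvDfs_sound (edges : List (Int × Int)) (dst : Int) :
    ∀ (f : Nat) (u : Int) (V : PySem.Set Int),
      (pvDfs (pvAdj edges) dst f u V).1 = true → pvReach edges u dst := by
  intro f
  induction f with
  | zero =>
    intro u V h
    simp [pvDfs] at h
  | succ f ih =>
    intro u V h
    by_cases h1 : u = dst
    · subst h1
      exact Relation.ReflTransGen.refl
    · by_cases h2 : u ∈ V
      · exfalso
        simp only [pvDfs, if_neg h1, if_pos h2] at h
        simp at h
      · simp only [pvDfs, if_neg h1, if_neg h2] at h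
        rcases pvDfsList_sound_step edges dst f ih _ _ h with ⟨w, hw, hr⟩
        exact Relation.ReflTransGen.head ((pvAdj_getD_mem edges u w).1 hw) hr

-- a closed set containing s absorbs everything reachable from s
theorem pvReach_mem_of_closed (edges : List (Int × Int)) (s : Int) (c : List Int)
    (hs : s ∈ c) (hc : ∀ u ∈ c, ∀ v, pvE edges u v → v ∈ c) :
    ∀ y, pvReach edges s y → y ∈ c := by
  intro y hy
  induction hy with
  | refl => exact hs
  | tail _ h ih => exact hc _ ih _ h

theorem pvA_iff (edges : List (Int × Int)) (source destination : Int) :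
    valid_path_for_undirected_graph edges source destination = true ↔
      pvReach edges source destination := by
  rw [valid_path_for_undirected_graph]
  constructor
  · intro h
    exact pvDfs_sound edges destination _ source PySem.Set.empty h
  · intro hreach
    cases hval : (pvDfs (pvAdj edges) destination (2 * edges.length + 2) source PySem.Set.empty).1 with
    | false =>
      exfalso
      obtain ⟨hInv', _, hsrc, hclos⟩ :=
        pvPdfs_all edges source destination (2 * edges.length + 2) PySem.Set.empty source
          ⟨List.nodup_nil, by intro x hx; simp [PySem.Set.empty] at hx, by simp [PySem.Set.empty]⟩
          (List.mem_cons_self ..) (by simp) hval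
      have hclosed : ∀ u ∈ (pvDfs (pvAdj edges) destination (2 * edges.length + 2) source PySem.Set.empty).2,
          ∀ v, pvE edges u v →
            v ∈ (pvDfs (pvAdj edges) destination (2 * edges.length + 2) source PySem.Set.empty).2 := by
        intro u hu v he
        exact hclos u hu (by simp [PySem.Set.empty]) v ((pvAdj_getD_mem edges u v).2 he)
      exact hInv'.2.2 (pvReach_mem_of_closed edges source _ hsrc hclosed destination hreach)
    | true => rfl

-- ===== B side =====

theorem pvGrowStep_mem (comp acc : PySem.Set Int) (e : Int × Int) (x : Int) :
    x ∈ pvGrowStep comp acc e ↔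
      x ∈ acc ∨ (e.1 ∈ comp ∧ x = e.2) ∨ (e.2 ∈ comp ∧ x = e.1) := by
  simp only [pvGrowStep]
  split_ifs <;> (simp_all [PySem.Set.mem_add]; try tauto)

theorem pvGrowStep_nodup (comp acc : PySem.Set Int) (e : Int × Int) (h : acc.Nodup) :
    (pvGrowStep comp acc e).Nodup := by
  simp only [pvGrowStep]
  split_ifs <;> first
    | exact h
    | exact PySem.Set.nodup_add _ _ h
    | exact PySem.Set.nodup_add _ _ (PySem.Set.nodup_add _ _ h)

theorem pvGrowStep_suffix (comp acc : PySem.Set Int) (e : Int × Int) :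
    ∃ ex, pvGrowStep comp acc e = acc ++ ex := by
  simp only [pvGrowStep]
  have hadd : ∀ (s : PySem.Set Int) (y : Int), ∃ ex, PySem.Set.add s y = s ++ ex := by
    intro s y
    rw [PySem.Set.add_eq_ite]
    split_ifs
    · exact ⟨[], by simp⟩
    · exact ⟨[y], rfl⟩
  split_ifs
  · rcases hadd acc e.2 with ⟨ex1, h1⟩
    rcases hadd (PySem.Set.add acc e.2) e.1 with ⟨ex2, h2⟩
    exact ⟨ex1 ++ ex2, by rw [h2, h1, List.append_assoc]⟩
  · exact hadd acc e.1
  · exact hadd acc e.2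
  · exact ⟨[], by simp⟩

theorem pvGrowFold_mem (comp : PySem.Set Int) (l : List (Int × Int)) (acc : PySem.Set Int) (x : Int) :
    x ∈ l.foldl (pvGrowStep comp) acc ↔
      x ∈ acc ∨ ∃ u ∈ comp, (u, x) ∈ l ∨ (x, u) ∈ l := by
  induction l generalizing acc with
  | nil => simp
  | cons e es ih =>
    rw [List.foldl_cons, ih, pvGrowStep_mem]
    simp only [List.mem_cons]
    constructor
    · rintro ((hx | ⟨h1, rfl⟩ | ⟨h2, rfl⟩) | ⟨u, hu, h | h⟩)
      · exact Or.inl hx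
      · exact Or.inr ⟨e.1, h1, Or.inl (Or.inl rfl)⟩
      · exact Or.inr ⟨e.2, h2, Or.inr (Or.inl rfl)⟩
      · exact Or.inr ⟨u, hu, Or.inl (Or.inr h)⟩
      · exact Or.inr ⟨u, hu, Or.inr (Or.inr h)⟩
    · rintro (hx | ⟨u, hu, (h | h) | (h | h)⟩)
      · exact Or.inl (Or.inl hx)
      · cases h; exact Or.inl (Or.inr (Or.inl ⟨hu, rfl⟩))
      · exact Or.inr ⟨u, hu, Or.inl h⟩
      · cases h; exact Or.inl (Or.inr (Or.inr ⟨hu, rfl⟩))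
      · exact Or.inr ⟨u, hu, Or.inr h⟩

theorem pvGrow_mem (edges : List (Int × Int)) (comp : PySem.Set Int) (hn : comp.Nodup) (x : Int) :
    x ∈ pvGrow edges comp ↔ x ∈ comp ∨ ∃ u ∈ comp, pvE edges u x := by
  rw [pvGrow, PySem.Set.ofList_eq_self_of_nodup _ hn, pvGrowFold_mem]
  rfl

theorem pvGrowFold_nodup (comp : PySem.Set Int) (l : List (Int × Int)) :
    ∀ acc : PySem.Set Int, acc.Nodup → (l.foldl (pvGrowStep comp) acc).Nodup := by
  induction l with
  | nil => intro acc h; exact h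
  | cons e es ih =>
    intro acc h
    rw [List.foldl_cons]
    exact ih _ (pvGrowStep_nodup _ _ _ h)

theorem pvGrowFold_suffix (comp : PySem.Set Int) (l : List (Int × Int)) :
    ∀ acc : PySem.Set Int, ∃ ex, l.foldl (pvGrowStep comp) acc = acc ++ ex := by
  induction l with
  | nil => intro acc; exact ⟨[], by simp⟩
  | cons e es ih =>
    intro acc
    rcases pvGrowStep_suffix comp acc e with ⟨ex1, h1⟩
    rcases ih (pvGrowStep comp acc e) with ⟨ex2, h2⟩
    exact ⟨ex1 ++ ex2, by rw [List.foldl_cons, h2, h1, List.append_assoc]⟩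

theorem pvGrow_nodup (edges : List (Int × Int)) (comp : PySem.Set Int) (hn : comp.Nodup) :
    (pvGrow edges comp).Nodup := by
  rw [pvGrow, PySem.Set.ofList_eq_self_of_nodup _ hn]
  exact pvGrowFold_nodup _ _ _ hn

theorem pvGrow_suffix (edges : List (Int × Int)) (comp : PySem.Set Int) (hn : comp.Nodup) :
    ∃ ex, pvGrow edges comp = comp ++ ex := by
  rw [pvGrow, PySem.Set.ofList_eq_self_of_nodup _ hn]
  exact pvGrowFold_suffix _ _ _

theorem pvGrow_fix_of_length (edges : List (Int × Int)) (comp : PySem.Set Int) (hn : comp.Nodup)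
    (h : (pvGrow edges comp).length = comp.length) : pvGrow edges comp = comp := by
  rcases pvGrow_suffix edges comp hn with ⟨ex, hex⟩
  rw [hex] at h ⊢
  rw [List.length_append] at h
  have : ex = [] := List.length_eq_zero_iff.1 (by omega)
  simp [this]

theorem pvLoopB_spec (edges : List (Int × Int)) (source destination : Int) :
    ∀ (n : Nat) (comp : PySem.Set Int), comp.Nodup →
      (∀ x ∈ comp, x ∈ pvU edges source) → source ∈ comp →
      (∀ x ∈ comp, pvReach edges source x) →
      2 * edges.length + 2 ≤ n + comp.length →
      ∃ c : PySem.Set Int, pvLoopB edges destination n comp = decide (destination ∈ c) ∧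
        source ∈ c ∧ (∀ x ∈ c, pvReach edges source x) ∧
        (∀ u ∈ c, ∀ v, pvE edges u v → v ∈ c) := by
  intro n
  induction n with
  | zero =>
    intro comp hnd hU _ _ hfuel
    have hle : comp.length ≤ (pvU edges source).length := pv_nodup_length_le hnd hU
    rw [pvU_length] at hle
    omega
  | succ n ih =>
    intro comp hnd hU hsrc hreach hfuel
    by_cases hlen : (pvGrow edges comp).length = comp.length
    · have hfix := pvGrow_fix_of_length edges comp hnd hlen
      refine ⟨comp, ?_, hsrc, hreach, ?_⟩
      · simp only [pvLoopB]
        rw [if_pos hlen]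
      · intro u hu v he
        have : v ∈ pvGrow edges comp := (pvGrow_mem edges comp hnd v).2 (Or.inr ⟨u, hu, he⟩)
        rwa [hfix] at this
    · have hmono : ∀ x ∈ comp, x ∈ pvGrow edges comp := fun x hx =>
        (pvGrow_mem edges comp hnd x).2 (Or.inl hx)
      have hlen' : comp.length + 1 ≤ (pvGrow edges comp).length := by
        rcases pvGrow_suffix edges comp hnd with ⟨ex, hex⟩
        rcases ex with _ | ⟨y, ex⟩
        · exact absurd (by rw [hex]; simp) hlen
        · rw [hex, List.length_append]
          simp only [List.length_cons]
          omega
      rcases ih (pvGrow edges comp) (pvGrow_nodup edges comp hnd)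
        (by
          intro x hx
          rcases (pvGrow_mem edges comp hnd x).1 hx with hx | ⟨u, _, he⟩
          · exact hU x hx
          · exact pvE_mem_U he source)
        (hmono source hsrc)
        (by
          intro x hx
          rcases (pvGrow_mem edges comp hnd x).1 hx with hx | ⟨u, hu, he⟩
          · exact hreach x hx
          · exact Relation.ReflTransGen.tail (hreach u hu) he)
        (by omega) with ⟨c, hc⟩
      refine ⟨c, ?_, hc.2⟩
      simp only [pvLoopB]
      rw [if_neg hlen]
      exact hc.1

theorem pvB_iff (edges : List (Int × Int)) (source destination : Int) :
    valid_path_for_undirected_graph_alt edges source destination = true ↔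
      pvReach edges source destination := by
  have h0 : PySem.Set.add PySem.Set.empty source = [source] := rfl
  rcases pvLoopB_spec edges source destination (2 * edges.length + 2) [source]
      (by simp) (by intro x hx; simp at hx; subst hx; exact List.mem_cons_self ..)
      (List.mem_cons_self ..)
      (by intro x hx; simp at hx; subst hx; exact Relation.ReflTransGen.refl)
      (by simp) with ⟨c, hres, hsrc, hreach, hclosed⟩
  rw [valid_path_for_undirected_graph_alt, h0, hres]
  simp only [decide_eq_true_eq]
  exact ⟨fun h => hreach _ h, fun h => pvReach_mem_of_closed edges source c hsrc hclosed _ h⟩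

theorem pv_main (edges : List (Int × Int)) (source destination : Int) :
    valid_path_for_undirected_graph edges source destination =
      valid_path_for_undirected_graph_alt edges source destination := by
  by_cases h : pvReach edges source destination
  · rw [(pvA_iff ..).2 h, (pvB_iff ..).2 h]
  · have ha : valid_path_for_undirected_graph edges source destination = false := by
      cases hval : valid_path_for_undirected_graph edges source destination
      · rfl
      · exact absurd ((pvA_iff ..).1 hval) h
    have hb : valid_path_for_undirected_graph_alt edges source destination = false := by
      cases hval : valid_path_for_undirected_graph_alt edges source destination
      · rfl
      · exact absurd ((pvB_iff ..).1 hval) h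
    rw [ha, hb]

-- ===== VERDICT (by name: the statement is the Claim_ definition above) =====
theorem valid_path_for_undirected_graph_spec : Claim_equal_valid_path_for_undirected_graph := by
  intro edges source destination _
  unfold Spec_valid_path_for_undirected_graph
  exact pv_main edges source destination
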